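-- pv_equiv track=rewrite | github.com/dulinnan/compsci_assign1 | new_game_positions.py | new_game_positions
-- ===== SOURCE A (Python) =====
-- def new_game_positions(start_index):
--     output_list = [0]
--     for i in range(8):
--         output_list.append(1)
--     if (5 <= start_index < 9):
--         for i in range(start_index-4, start_index):
--             output_list[i] = 2
--     if (1 <= start_index < 5):
--         for i in range(1, start_index):
--             output_list[i] = 2
--         for i in range(start_index+4, 9):
--             output_list[i] = 2
--
--     return output_list
-- ===== SOURCE B (Python) =====
-- def new_game_positions(start_index):
--     # Closed form: position 0 is 0; position i (1..8) holds 2 exactly when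
--     # start_index is a valid board index and i lies in the half of the cycle
--     # at circular distance >= 4 behind start_index, else 1.
--     return [0] + [2 if 1 <= start_index < 9 and (i - start_index) % 8 >= 4 else 1
--                   for i in range(1, 9)]
-- ===== Notes on version B (the rewrite author's own statement) =====
-- stated objective: alternative
-- what changed: A initialises the board to ones and overwrites guarded index ranges in place; B decides each cell directly in one comprehension by a closed-form circular-distance test (the cell's offset from start_index modulo the cycle length, compared against half the cycle), with no range overwrites.
import Mathlib
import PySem

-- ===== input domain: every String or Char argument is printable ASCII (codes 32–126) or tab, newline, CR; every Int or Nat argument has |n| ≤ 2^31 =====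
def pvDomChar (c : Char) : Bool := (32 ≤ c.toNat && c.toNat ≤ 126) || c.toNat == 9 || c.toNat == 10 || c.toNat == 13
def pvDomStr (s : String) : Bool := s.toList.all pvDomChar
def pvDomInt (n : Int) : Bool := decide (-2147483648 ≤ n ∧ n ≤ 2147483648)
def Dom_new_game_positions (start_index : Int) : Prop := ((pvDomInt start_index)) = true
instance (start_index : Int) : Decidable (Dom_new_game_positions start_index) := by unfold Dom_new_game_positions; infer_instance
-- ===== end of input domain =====

-- B replaces A's init-then-overwrite range loops with a closed-form circular-distance test per cell (alternative decomposition; same cost).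


-- ===== PORT A =====
def new_game_positions (start_index : Int) : List Int :=
  let output_list : List Int := [0]
  let output_list := (PySem.List.pyRange 0 8 1).foldl (fun acc _ => acc ++ [1]) output_list
  let output_list :=
    if 5 ≤ start_index ∧ start_index < 9 then
      (PySem.List.pyRange (start_index - 4) start_index 1).foldl
        (fun acc i => PySem.List.pySetD acc i (2 : Int)) output_list
    else output_list
  let output_list :=
    if 1 ≤ start_index ∧ start_index < 5 then
      let output_list := (PySem.List.pyRange 1 start_index 1).foldl
        (fun acc i => PySem.List.pySetD acc i (2 : Int)) output_list
      (PySem.List.pyRange (start_index + 4) 9 1).foldl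
        (fun acc i => PySem.List.pySetD acc i (2 : Int)) output_list
    else output_list
  output_list

-- ===== PORT B =====
def new_game_positions_alt (start_index : Int) : List Int :=
  [0] ++ (PySem.List.pyRange 1 9 1).map
    (fun i => if (1 ≤ start_index ∧ start_index < 9) ∧ 4 ≤ PySem.Int.mod (i - start_index) 8 then (2 : Int) else 1)

-- ===== PRECONDITION & SPEC =====
def Spec_new_game_positions (start_index : Int) (out : List Int) : Prop := out = new_game_positions_alt start_index
instance (start_index : Int) (out : List Int) : Decidable (Spec_new_game_positions start_index out) := by unfold Spec_new_game_positions; infer_instance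

-- ===== CLAIM (what is proved, stated in full; the proofs are below) =====
def Claim_equal_new_game_positions : Prop := ∀ (start_index : Int), Dom_new_game_positions start_index → Spec_new_game_positions start_index (new_game_positions start_index)

-- ===== LEMMAS AND PROOFS =====

-- ===== VERDICT (by name: the statement is the Claim_ definition above) =====
theorem new_game_positions_spec : Claim_equal_new_game_positions := by
  intro s _
  unfold Spec_new_game_positions
  by_cases h : 1 ≤ s ∧ s < 9
  · obtain ⟨h1, h2⟩ := h
    interval_cases s <;> decide
  · have h1 : ¬ (5 ≤ s ∧ s < 9) := by omega
    have h2 : ¬ (1 ≤ s ∧ s < 5) := by omega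
    simp [new_game_positions, new_game_positions_alt, h, h1, h2, PySem.List.pyRange]
    decide
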